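-- pv_equiv track=rewrite | github.com/grondilu/grondilu.github.io | memchess/tools/audit_collisions.py | find_collisions_in_bucket
-- ===== SOURCE A (Python) =====
-- from typing import Dict, List, Optional, Tuple, DefaultDict, Set
-- from collections import defaultdict, OrderedDict
--
-- def split_string_into_moves(history: str) -> List[str]:
--     moves: List[str] = []
--     while history:
--         if history.startswith("O-O-O"):
--             moves.append("O-O-O")
--             history = history[5:]
--             continue
--         if history.startswith("O-O"):
--             moves.append("O-O")
--             history = history[3:]
--             continue
--
--         digit_index = 0
--         for i, ch in enumerate(history):
--             if ch.isdigit():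
--                 if i > 0 and history[i - 1] in ("N", "R"):
--                     continue
--                 digit_index = i
--                 break
--
--         if len(history) > digit_index + 1 and history[digit_index + 1] in ("+", "#"):
--             digit_index += 1
--
--         if len(history) > digit_index + 1 and history[digit_index + 1] == "=":
--             digit_index += 2
--
--         moves.append(history[: digit_index + 1])
--         history = history[digit_index + 1 :]
--
--     return moves
--
-- def normalize_move_token(tok: str) -> str:
--     tok = tok.strip()
--     # Rare dataset quirk: '+Ke1' -> 'Ke1+'
--     if tok and tok[0] in ("+", "#") and len(tok) > 1:
--         tok = tok[1:] + tok[0]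
--     return tok
--
-- def find_collisions_in_bucket(
--     bucket_lines: List[str],
--     user_ply_parity: int,
--     min_plies: int = 0,
-- ) -> Dict[str, Dict[str, List[int]]]:
--     """
--     collisions[prefix_string][next_move_norm] = [line_idx, ...]
--     Keep only prefixes where 2+ distinct next moves exist.
--
--     prefix_string is the *concatenated* token prefix (legacy memchess style).
--     """
--     prefix_to_next: DefaultDict[str, DefaultDict[str, List[int]]] = defaultdict(lambda: defaultdict(list))
--
--     for idx, child in enumerate(bucket_lines):
--         tokens = split_string_into_moves(child)
--         for ply in range(0, len(tokens)):
--             if ply < min_plies: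
--                 continue
--             if ply % 2 != user_ply_parity:
--                 continue
--             prefix_str = "".join(tokens[:ply])
--             next_norm = normalize_move_token(tokens[ply])
--             prefix_to_next[prefix_str][next_norm].append(idx)
--
--     return {p: dict(mvmap) for p, mvmap in prefix_to_next.items() if len(mvmap) >= 2}
-- ===== SOURCE B (Python) =====
-- from typing import List, Dict
--
--
-- def split_string_into_moves(history: str) -> List[str]:
--     moves: List[str] = []
--     while history:
--         if history.startswith("O-O-O"):
--             moves.append("O-O-O")
--             history = history[5:]
--             continue
--         if history.startswith("O-O"):
--             moves.append("O-O")
--             history = history[3:]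
--             continue
--
--         digit_index = 0
--         for i, ch in enumerate(history):
--             if ch.isdigit():
--                 if i > 0 and history[i - 1] in ("N", "R"):
--                     continue
--                 digit_index = i
--                 break
--
--         if len(history) > digit_index + 1 and history[digit_index + 1] in ("+", "#"):
--             digit_index += 1
--
--         if len(history) > digit_index + 1 and history[digit_index + 1] == "=":
--             digit_index += 2
--
--         moves.append(history[: digit_index + 1])
--         history = history[digit_index + 1 :]
--
--     return moves
--
--
-- def normalize_move_token(tok: str) -> str:
--     tok = tok.strip()
--     if tok and tok[0] in ("+", "#") and len(tok) > 1:
--         tok = tok[1:] + tok[0]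
--     return tok
--
--
-- def find_collisions_in_bucket(
--     bucket_lines: List[str],
--     user_ply_parity: int,
--     min_plies: int = 0,
-- ) -> Dict[str, Dict[str, List[int]]]:
--     # Pass 1: flat (prefix, normalized next move, line index) records, the prefix
--     # built incrementally instead of re-joining tokens[:ply] at every ply.
--     records = []
--     for idx, child in enumerate(bucket_lines):
--         prefix = ""
--         for ply, tok in enumerate(split_string_into_moves(child)):
--             if ply >= min_plies and ply % 2 == user_ply_parity:
--                 records.append((prefix, normalize_move_token(tok), idx))
--             prefix += tok
--     # Pass 2: one-level grouping of the flat records by prefix.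
--     groups: Dict[str, List] = {}
--     for p, n, i in records:
--         groups.setdefault(p, []).append((n, i))
--     # Pass 3: per prefix, assemble next-move groups in first-occurrence order.
--     result: Dict[str, Dict[str, List[int]]] = {}
--     for p, lst in groups.items():
--         nexts = list(dict.fromkeys(n for n, _ in lst))
--         if len(nexts) >= 2:
--             result[p] = {n: [i for nn, i in lst if nn == n] for n in nexts}
--     return result
-- ===== Notes on version B (the rewrite author's own statement) =====
-- stated objective: alternative
-- what changed: Replaces A's nested defaultdict built while re-joining tokens[:ply] at every ply by a three-pass pipeline: one flat pass emitting (prefix, next, idx) records with the prefix string grown incrementally, a one-level setdefault-dict grouping of the flat records by prefix, and a per-prefix assembly of the inner next-move groups via ordered dedup plus filtering.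
import Mathlib
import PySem

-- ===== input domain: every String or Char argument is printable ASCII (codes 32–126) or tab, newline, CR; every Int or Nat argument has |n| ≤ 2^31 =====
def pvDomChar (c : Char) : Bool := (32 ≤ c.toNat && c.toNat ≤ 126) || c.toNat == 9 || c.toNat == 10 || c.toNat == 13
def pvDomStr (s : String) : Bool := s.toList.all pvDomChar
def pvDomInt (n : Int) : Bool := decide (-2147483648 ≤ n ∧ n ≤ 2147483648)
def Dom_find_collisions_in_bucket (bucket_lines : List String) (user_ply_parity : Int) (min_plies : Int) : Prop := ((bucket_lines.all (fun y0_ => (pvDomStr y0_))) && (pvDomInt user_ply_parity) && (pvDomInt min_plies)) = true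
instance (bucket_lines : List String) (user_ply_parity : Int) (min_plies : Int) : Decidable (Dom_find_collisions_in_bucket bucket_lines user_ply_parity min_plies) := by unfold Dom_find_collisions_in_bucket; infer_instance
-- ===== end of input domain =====

-- B replaces A's nested-defaultdict construction (with a per-ply re-join of the prefix)
-- by a flat record pass with an incrementally built prefix, a one-level grouping dict,
-- and a dedup/filter assembly of the inner groups (objective: alternative pipeline).

-- ===== PORT A =====
-- shared module helpers (split_string_into_moves, normalize_move_token), used by both Pythons

-- the inner 'for i, ch in enumerate(history)' scan for the digit index (0 if no break)
def pvDigitIndexGo : List Char → Nat → Option Char → Nat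
  | [], _, _ => 0
  | c :: rest, i, prev =>
    if PySem.Chars.isdigit c then
      if 0 < i ∧ (prev = some 'N' ∨ prev = some 'R') then pvDigitIndexGo rest (i + 1) (some c)
      else i
    else pvDigitIndexGo rest (i + 1) (some c)

-- length of the move consumed by one iteration of the while-loop body (digit_index + 1)
def pvMoveLen (cs : List Char) : Nat :=
  let d0 := pvDigitIndexGo cs 0 none
  let d1 := if d0 + 1 < cs.length ∧ (cs.getD (d0 + 1) ' ' = '+' ∨ cs.getD (d0 + 1) ' ' = '#') then d0 + 1 else d0
  let d2 := if d1 + 1 < cs.length ∧ cs.getD (d1 + 1) ' ' = '=' then d1 + 2 else d1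
  d2 + 1

-- needed by pvSplitMoves's termination proof
theorem pvMoveLen_pos (cs : List Char) : 0 < pvMoveLen cs := by
  simp only [pvMoveLen]; split_ifs <;> omega

-- split_string_into_moves (the while-loop as structural recursion on the remaining chars)
def pvSplitMoves (cs : List Char) : List (List Char) :=
  if h : cs = [] then []
  else if PySem.Chars.startswith cs ['O', '-', 'O', '-', 'O'] then
    ['O', '-', 'O', '-', 'O'] :: pvSplitMoves (cs.drop 5)
  else if PySem.Chars.startswith cs ['O', '-', 'O'] then
    ['O', '-', 'O'] :: pvSplitMoves (cs.drop 3)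
  else
    cs.take (pvMoveLen cs) :: pvSplitMoves (cs.drop (pvMoveLen cs))
termination_by cs.length
decreasing_by
  all_goals
    simp only [List.length_drop]
    have hp := pvMoveLen_pos cs
    have h0 : 0 < cs.length := List.length_pos_iff.mpr h
    omega

-- normalize_move_token
def pvNormTok (cs : List Char) : List Char :=
  match PySem.Chars.strip cs with
  | [] => []
  | c :: rest => if (c = '+' ∨ c = '#') ∧ rest ≠ [] then rest ++ [c] else c :: rest

def find_collisions_in_bucket (bucket_lines : List String) (user_ply_parity : Int) (min_plies : Int) : List (String × List (String × List Int)) :=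
  let st := bucket_lines.foldl
    (fun (st : PySem.Dict String (PySem.Dict String (List Int)) × Int) child =>
      let tokens := pvSplitMoves child.toList
      let d := (PySem.List.pyRange 0 (PySem.List.len tokens) 1).foldl
        (fun d ply =>
          if ply < min_plies then d
          else if PySem.Int.mod ply 2 ≠ user_ply_parity then d
          else
            let prefix_str := String.ofList (PySem.Chars.join [] (PySem.List.slice tokens none (some ply)))
            let next_norm := String.ofList (pvNormTok (PySem.List.pyGetD tokens ply []))
            d.modify prefix_str PySem.Dict.empty
              (fun inn => inn.modify next_norm [] (fun l => l ++ [st.2])))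
        st.1
      (d, st.2 + 1))
    (PySem.Dict.empty, 0)
  (st.1.items.filter (fun pr => 2 ≤ pr.2.size)).map (fun pr => (pr.1, pr.2.items))

-- ===== PORT B =====
-- pass 1 inner loop: records.append((prefix, normalize_move_token(tok), idx)); prefix += tok
def pvRecsGo (user_ply_parity min_plies idx : Int) :
    Int → List Char → List (List Char) → List (String × String × Int) → List (String × String × Int)
  | _, _, [], acc => acc
  | ply, pre, t :: ts, acc =>
    pvRecsGo user_ply_parity min_plies idx (ply + 1) (pre ++ t) ts
      (if min_plies ≤ ply ∧ PySem.Int.mod ply 2 = user_ply_parity then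
        acc ++ [(String.ofList pre, String.ofList (pvNormTok t), idx)]
      else acc)

def find_collisions_in_bucket_alt (bucket_lines : List String) (user_ply_parity : Int) (min_plies : Int) : List (String × List (String × List Int)) :=
  let st := bucket_lines.foldl
    (fun (st : List (String × String × Int) × Int) child =>
      (pvRecsGo user_ply_parity min_plies st.2 0 [] (pvSplitMoves child.toList) st.1, st.2 + 1))
    ([], 0)
  let records := st.1
  let groups : PySem.Dict String (List (String × Int)) :=
    records.foldl (fun g r => g.modify r.1 [] (fun l => l ++ [(r.2.1, r.2.2)])) PySem.Dict.empty
  groups.items.foldl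
    (fun out pr =>
      let nexts := PySem.List.dedup (pr.2.map (fun q => q.1))
      if 2 ≤ nexts.length then
        out ++ [(pr.1, nexts.map (fun n => (n, (pr.2.filter (fun q => q.1 == n)).map (fun q => q.2))))]
      else out)
    []

-- ===== PRECONDITION & SPEC =====
def Spec_find_collisions_in_bucket (bucket_lines : List String) (user_ply_parity : Int) (min_plies : Int) (out : List (String × List (String × List Int))) : Prop := out = find_collisions_in_bucket_alt bucket_lines user_ply_parity min_plies
instance (bucket_lines : List String) (user_ply_parity : Int) (min_plies : Int) (out : List (String × List (String × List Int))) : Decidable (Spec_find_collisions_in_bucket bucket_lines user_ply_parity min_plies out) := by unfold Spec_find_collisions_in_bucket; infer_instance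

-- ===== CLAIM (what is proved, stated in full; the proofs are below) =====
def Claim_equal_find_collisions_in_bucket : Prop := ∀ (bucket_lines : List String) (user_ply_parity : Int) (min_plies : Int), Dom_find_collisions_in_bucket bucket_lines user_ply_parity min_plies → Spec_find_collisions_in_bucket bucket_lines user_ply_parity min_plies (find_collisions_in_bucket bucket_lines user_ply_parity min_plies)

-- ===== LEMMAS AND PROOFS =====

-- the per-record update A performs on its nested dict
def pvOp (d : PySem.Dict String (PySem.Dict String (List Int))) (r : String × String × Int) :
    PySem.Dict String (PySem.Dict String (List Int)) :=
  d.modify r.1 PySem.Dict.empty (fun inn => inn.modify r.2.1 [] (fun l => l ++ [r.2.2]))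

-- the (prefix, next, idx) records one line contributes, prefix built incrementally
def pvLineRecs (upp mp idx : Int) : Int → List Char → List (List Char) → List (String × String × Int)
  | _, _, [] => []
  | ply, pre, t :: ts =>
    (if mp ≤ ply ∧ PySem.Int.mod ply 2 = upp then [(String.ofList pre, String.ofList (pvNormTok t), idx)] else [])
      ++ pvLineRecs upp mp idx (ply + 1) (pre ++ t) ts

def pvAllRecs (upp mp : Int) : List String → Int → List (String × String × Int)
  | [], _ => []
  | c :: ls, i => pvLineRecs upp mp i 0 [] (pvSplitMoves c.toList) ++ pvAllRecs upp mp ls (i + 1)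

-- the inner dict A builds for one prefix group
def pvInner (G : List (String × String × Int)) : PySem.Dict String (List Int) :=
  G.foldl (fun inn r => inn.modify r.2.1 [] (fun l => l ++ [r.2.2])) PySem.Dict.empty

def pvGroup (R : List (String × String × Int)) (p : String) : List (String × String × Int) :=
  R.filter (fun r => r.1 == p)

def pvNexts (R : List (String × String × Int)) (p : String) : List String :=
  PySem.Set.ofList ((pvGroup R p).map (fun r => r.2.1))

-- the common normal form both outputs are reduced to
def pvCanon (R : List (String × String × Int)) : List (String × List (String × List Int)) :=
  ((PySem.Set.ofList (R.map (fun r => r.1))).filter (fun p => decide (2 ≤ (pvNexts R p).length))).map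
    (fun p => (p, (pvNexts R p).map
      (fun n => (n, ((pvGroup R p).filter (fun r => r.2.1 == n)).map (fun r => r.2.2)))))

theorem pvJoin_nil (ps : List (List Char)) : PySem.Chars.join [] ps = ps.flatten := by
  induction ps with
  | nil => simp [PySem.Chars.join_nil]
  | cons a ps ih =>
    cases ps with
    | nil => simp [PySem.Chars.join_singleton]
    | cons b rest => rw [PySem.Chars.join_cons_cons]; simp [ih]

theorem pvRecsGo_eq (upp mp idx : Int) (ts : List (List Char)) :
    ∀ (ply : Int) (pre : List Char) acc,
      pvRecsGo upp mp idx ply pre ts acc = acc ++ pvLineRecs upp mp idx ply pre ts := by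
  induction ts with
  | nil => intro ply pre acc; simp [pvRecsGo, pvLineRecs]
  | cons t ts ih =>
    intro ply pre acc
    simp only [pvRecsGo, pvLineRecs]
    rw [ih]
    split_ifs <;> simp

theorem pvA_line (upp mp idx : Int) (ts : List (List Char)) :
    ∀ (n : Nat) (k : Nat) (d : PySem.Dict String (PySem.Dict String (List Int))),
      ts.length - k = n → k ≤ ts.length →
      ((PySem.List.pyRange (k : Int) (ts.length : Int) 1).foldl
        (fun d ply =>
          if ply < mp then d
          else if PySem.Int.mod ply 2 ≠ upp then d
          else
            d.modify (String.ofList (PySem.Chars.join [] (PySem.List.slice ts none (some ply)))) PySem.Dict.empty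
              (fun inn => inn.modify (String.ofList (pvNormTok (PySem.List.pyGetD ts ply []))) []
                (fun l => l ++ [idx])))
        d)
      = (pvLineRecs upp mp idx (k : Int) ((ts.take k).flatten) (ts.drop k)).foldl pvOp d := by
  intro n
  induction n with
  | zero =>
    intro k d hk hle
    have hk' : k = ts.length := by omega
    subst hk'
    rw [PySem.List.pyRange_one_eq_nil (le_refl _), List.drop_length]
    simp [pvLineRecs]
  | succ n ih =>
    intro k d hk hle
    have hk' : k < ts.length := by omega
    have hkZ : (k : Int) < (ts.length : Int) := by exact_mod_cast hk'
    rw [PySem.List.pyRange_one_cons hkZ, List.foldl_cons]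
    have hd : ts.drop k = ts[k] :: ts.drop (k + 1) := (List.getElem_cons_drop hk').symm
    rw [hd]
    simp only [pvLineRecs]
    rw [List.foldl_append]
    have hcast : (k : Int) + 1 = ((k + 1 : Nat) : Int) := by push_cast; ring
    have hpre : (ts.take (k + 1)).flatten = (ts.take k).flatten ++ ts[k] := by
      rw [List.take_add_one, List.getElem?_eq_getElem hk']
      simp only [Option.toList_some, List.flatten_append, List.flatten_cons, List.flatten_nil,
        List.append_nil]
    by_cases h1 : (k : Int) < mp
    · rw [if_pos h1]
      have hg : ¬ (mp ≤ (k : Int) ∧ PySem.Int.mod (k : Int) 2 = upp) := by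
        rintro ⟨h, -⟩; omega
      rw [if_neg hg]
      simp only [List.foldl_nil]
      rw [hcast, ih (k + 1) d (by omega) (by omega), hpre]
    · rw [if_neg h1]
      by_cases h2 : PySem.Int.mod (k : Int) 2 = upp
      · rw [if_neg (fun hne => hne h2)]
        rw [if_pos ⟨by omega, h2⟩]
        have hslice : PySem.List.slice ts none (some ((k : Int))) = ts.take k :=
          PySem.List.slice_to_natCast ts k
        have hget : PySem.List.pyGetD ts ((k : Int)) [] = ts[k] := by
          rw [PySem.List.pyGetD_natCast, List.getD_eq_getElem _ _ hk']
        rw [hslice, hget, pvJoin_nil]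
        simp only [List.foldl_cons, List.foldl_nil]
        rw [hcast, ih (k + 1) _ (by omega) (by omega), hpre]
        rfl
      · rw [if_pos h2, if_neg (by rintro ⟨-, h⟩; exact h2 h)]
        simp only [List.foldl_nil]
        rw [hcast, ih (k + 1) d (by omega) (by omega), hpre]

theorem pvA_fold (upp mp : Int) (lines : List String) :
    ∀ (d : PySem.Dict String (PySem.Dict String (List Int))) (i : Int),
      (lines.foldl
        (fun (st : PySem.Dict String (PySem.Dict String (List Int)) × Int) child =>
          let tokens := pvSplitMoves child.toList
          let d := (PySem.List.pyRange 0 (PySem.List.len tokens) 1).foldl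
            (fun d ply =>
              if ply < mp then d
              else if PySem.Int.mod ply 2 ≠ upp then d
              else
                let prefix_str := String.ofList (PySem.Chars.join [] (PySem.List.slice tokens none (some ply)))
                let next_norm := String.ofList (pvNormTok (PySem.List.pyGetD tokens ply []))
                d.modify prefix_str PySem.Dict.empty
                  (fun inn => inn.modify next_norm [] (fun l => l ++ [st.2])))
            st.1
          (d, st.2 + 1))
        (d, i))
      = ((pvAllRecs upp mp lines i).foldl pvOp d, i + lines.length) := by
  induction lines with
  | nil => intro d i; simp [pvAllRecs]
  | cons c ls ih =>
    intro d i
    rw [List.foldl_cons]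
    dsimp only
    rw [PySem.List.len_eq, ih]
    have hline := pvA_line upp mp i (pvSplitMoves c.toList) (pvSplitMoves c.toList).length 0 d rfl (Nat.zero_le _)
    simp only [Nat.cast_zero, List.take_zero, List.flatten_nil, List.drop_zero] at hline
    rw [hline]
    simp only [pvAllRecs, List.foldl_append, List.length_cons, Prod.mk.injEq]
    exact ⟨by trivial, by push_cast; ring⟩

theorem pvB_fold (upp mp : Int) (lines : List String) :
    ∀ (acc : List (String × String × Int)) (i : Int),
      (lines.foldl
        (fun (st : List (String × String × Int) × Int) child =>
          (pvRecsGo upp mp st.2 0 [] (pvSplitMoves child.toList) st.1, st.2 + 1))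
        (acc, i))
      = (acc ++ pvAllRecs upp mp lines i, i + lines.length) := by
  induction lines with
  | nil => intro acc i; simp [pvAllRecs]
  | cons c ls ih =>
    intro acc i
    rw [List.foldl_cons]
    dsimp only
    rw [pvRecsGo_eq, ih]
    simp only [pvAllRecs, List.append_assoc, List.length_cons, Prod.mk.injEq]
    exact ⟨by trivial, by push_cast; ring⟩

theorem pvGetD_fold (R : List (String × String × Int)) :
    ∀ (d : PySem.Dict String (PySem.Dict String (List Int))) (p : String),
      (R.foldl pvOp d).getD p PySem.Dict.empty
      = (pvGroup R p).foldl (fun inn r => inn.modify r.2.1 [] (fun l => l ++ [r.2.2]))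
          (d.getD p PySem.Dict.empty) := by
  induction R with
  | nil => intro d p; simp [pvGroup]
  | cons r R ih =>
    intro d p
    simp only [List.foldl_cons]
    rw [ih]
    simp only [pvGroup, List.filter_cons]
    by_cases h : r.1 = p
    · simp [pvOp, PySem.Dict.getD_modify, h]
    · simp only [pvOp, PySem.Dict.getD_modify]
      rw [if_neg (fun hh : p = r.1 => h hh.symm)]
      simp [h]

theorem pvD_keys (R : List (String × String × Int)) :
    (R.foldl pvOp PySem.Dict.empty).keys = PySem.Set.ofList (R.map (fun r => r.1)) := by
  have h := PySem.Dict.keys_foldl_modify_key (l := R)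
    (key := fun r : String × String × Int => r.1)
    (d0 := (PySem.Dict.empty : PySem.Dict String (List Int)))
    (f := fun _ r => fun inn => inn.modify r.2.1 [] (fun l => l ++ [r.2.2]))
    (d := PySem.Dict.empty)
  simpa [pvOp, PySem.Set.update_empty] using h

theorem pvD_nodup (R : List (String × String × Int)) :
    (R.foldl pvOp PySem.Dict.empty).keys.Nodup := by
  have h := PySem.Dict.nodup_keys_foldl_modify_key (l := R)
    (key := fun r : String × String × Int => r.1)
    (d0 := (PySem.Dict.empty : PySem.Dict String (List Int)))
    (f := fun _ r => fun inn => inn.modify r.2.1 [] (fun l => l ++ [r.2.2]))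
    (d := PySem.Dict.empty) (by simp)
  simpa [pvOp] using h

theorem pvInner_getD (G : List (String × String × Int)) (n : String) :
    (pvInner G).getD n [] = (G.filter (fun r => r.2.1 == n)).map (fun r => r.2.2) := by
  have h1 : pvInner G = (G.map (fun r : String × String × Int => (r.2.1, r.2.2))).foldl
      (fun d q => d.modify q.1 [] (fun l => l ++ [q.2])) PySem.Dict.empty := by
    rw [List.foldl_map]; rfl
  rw [h1, PySem.Dict.getD_foldl_modify_append]
  simp [List.filter_map, List.map_map, Function.comp_def]

theorem pvInner_keys (G : List (String × String × Int)) :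
    (pvInner G).keys = PySem.Set.ofList (G.map (fun r => r.2.1)) := by
  have h := PySem.Dict.keys_foldl_modify_key (l := G)
    (key := fun r : String × String × Int => r.2.1)
    (d0 := ([] : List Int))
    (f := fun _ r => fun l => l ++ [r.2.2])
    (d := PySem.Dict.empty)
  simpa [pvInner, PySem.Set.update_empty] using h

theorem pvInner_nodup (G : List (String × String × Int)) : (pvInner G).keys.Nodup := by
  have h := PySem.Dict.nodup_keys_foldl_modify_key (l := G)
    (key := fun r : String × String × Int => r.2.1)
    (d0 := ([] : List Int))
    (f := fun _ r => fun l => l ++ [r.2.2])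
    (d := PySem.Dict.empty) (by simp)
  simpa [pvInner] using h

theorem pvInner_items (G : List (String × String × Int)) :
    (pvInner G).items = (PySem.Set.ofList (G.map (fun r => r.2.1))).map
      (fun n => (n, (G.filter (fun r => r.2.1 == n)).map (fun r => r.2.2))) := by
  rw [PySem.Dict.items_eq_map_keys _ (pvInner_nodup G) ([] : List Int), pvInner_keys]
  exact List.map_congr_left (fun n _ => by rw [pvInner_getD])

theorem pvGroups_getD (R : List (String × String × Int)) (p : String) :
    (R.foldl (fun g r => g.modify r.1 [] (fun l => l ++ [(r.2.1, r.2.2)])) PySem.Dict.empty).getD p []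
    = (pvGroup R p).map (fun r => (r.2.1, r.2.2)) := by
  have h1 : (R.foldl (fun g r => g.modify r.1 [] (fun l => l ++ [(r.2.1, r.2.2)])) PySem.Dict.empty)
      = (R.map (fun r : String × String × Int => (r.1, (r.2.1, r.2.2)))).foldl
        (fun g q => g.modify q.1 [] (fun l => l ++ [q.2])) PySem.Dict.empty := by
    rw [List.foldl_map]
  rw [h1, PySem.Dict.getD_foldl_modify_append]
  simp [pvGroup, List.filter_map, List.map_map, Function.comp_def]

theorem pvGroups_keys (R : List (String × String × Int)) :
    (R.foldl (fun g r => g.modify r.1 [] (fun l => l ++ [(r.2.1, r.2.2)])) PySem.Dict.empty).keys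
    = PySem.Set.ofList (R.map (fun r => r.1)) := by
  have h := PySem.Dict.keys_foldl_modify_key (l := R)
    (key := fun r : String × String × Int => r.1)
    (d0 := ([] : List (String × Int)))
    (f := fun _ r => fun l => l ++ [(r.2.1, r.2.2)])
    (d := PySem.Dict.empty)
  simpa [PySem.Set.update_empty] using h

theorem pvGroups_nodup (R : List (String × String × Int)) :
    (R.foldl (fun g r => g.modify r.1 [] (fun l => l ++ [(r.2.1, r.2.2)])) PySem.Dict.empty).keys.Nodup := by
  have h := PySem.Dict.nodup_keys_foldl_modify_key (l := R)
    (key := fun r : String × String × Int => r.1)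
    (d0 := ([] : List (String × Int)))
    (f := fun _ r => fun l => l ++ [(r.2.1, r.2.2)])
    (d := PySem.Dict.empty) (by simp)
  simpa using h

theorem pvAout (R : List (String × String × Int)) :
    (((R.foldl pvOp PySem.Dict.empty).items.filter (fun pr => 2 ≤ pr.2.size)).map
      (fun pr => (pr.1, pr.2.items))) = pvCanon R := by
  have hI : ∀ p, (R.foldl pvOp PySem.Dict.empty).getD p PySem.Dict.empty = pvInner (pvGroup R p) := by
    intro p
    rw [pvGetD_fold]
    simp [pvInner]
  rw [PySem.Dict.items_eq_map_keys _ (pvD_nodup R) PySem.Dict.empty, pvD_keys,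
    List.filter_map, List.map_map]
  unfold pvCanon
  have hsize : ∀ p, (pvInner (pvGroup R p)).size = (pvNexts R p).length := by
    intro p
    show (pvInner (pvGroup R p)).items.length = _
    rw [pvInner_items]
    simp [pvNexts]
  simp only [Function.comp_def, hI, hsize, pvInner_items]
  simp only [pvNexts]

theorem pvBout (R : List (String × String × Int)) :
    ((R.foldl (fun g r => g.modify r.1 [] (fun l => l ++ [(r.2.1, r.2.2)])) PySem.Dict.empty).items.foldl
      (fun out pr =>
        let nexts := PySem.List.dedup (pr.2.map (fun q => q.1))
        if 2 ≤ nexts.length then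
          out ++ [(pr.1, nexts.map (fun n => (n, (pr.2.filter (fun q => q.1 == n)).map (fun q => q.2))))]
        else out)
      []) = pvCanon R := by
  rw [PySem.Dict.items_eq_map_keys _ (pvGroups_nodup R) ([] : List (String × Int)), pvGroups_keys]
  rw [PySem.List.foldl_append_ite
    (p := fun pr : String × List (String × Int) => 2 ≤ (PySem.List.dedup (pr.2.map (fun q => q.1))).length)
    (f := fun pr : String × List (String × Int) =>
      (pr.1, (PySem.List.dedup (pr.2.map (fun q => q.1))).map
        (fun n => (n, (pr.2.filter (fun q => q.1 == n)).map (fun q => q.2)))))]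
  rw [List.nil_append, List.filter_map, List.map_map]
  unfold pvCanon
  have hG : ∀ p, (R.foldl (fun g r => g.modify r.1 [] (fun l => l ++ [(r.2.1, r.2.2)])) PySem.Dict.empty).getD p []
      = (pvGroup R p).map (fun r : String × String × Int => (r.2.1, r.2.2)) := pvGroups_getD R
  have hN : ∀ p, PySem.List.dedup (((pvGroup R p).map (fun r : String × String × Int => (r.2.1, r.2.2))).map (fun q => q.1))
      = pvNexts R p := by
    intro p
    simp [PySem.List.dedup, pvNexts, List.map_map, Function.comp_def]
  simp only [Function.comp_def, hG, hN, List.filter_map, List.map_map, pvNexts]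
  simp only [PySem.List.dedup]
  rfl

-- ===== VERDICT (by name: the statement is the Claim_ definition above) =====
theorem find_collisions_in_bucket_spec : Claim_equal_find_collisions_in_bucket := by
  intro lines upp mp _
  unfold Spec_find_collisions_in_bucket find_collisions_in_bucket find_collisions_in_bucket_alt
  simp only [pvA_fold upp mp lines PySem.Dict.empty 0, pvB_fold upp mp lines [] 0,
    List.nil_append]
  rw [pvAout, pvBout]
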